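-- pv_equiv track=rewrite | github.com/trainesb/CSE231-Python | proj09/proj09.py | get_tags_by_month_for_users
-- ===== SOURCE A (Python) =====
-- from operator import itemgetter
--
-- def get_tags_by_month_for_users(data,usernames):
--     '''takes data and sorts by month, and username. then adds hashtags to a
--     set and adds them to a dict with month as its key. turns this dict into
--     a tuplle adds the tupple to a list and returns the list'''
--     tags_by_month = [(1,set()),(2,set()),(3,set()),(4,set()),(5,set()),\
--                      (6,set()),(7,set()),(8,set()),(9,set()),(10,set()),\
--                      (11,set()),(12,set()),]
--     L =[]
--     for i in data:
--         if i[0] in usernames: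
--             L.append(i)
--     L = sorted(L, key=itemgetter(1))
--     for a in L:
--         for i in tags_by_month:
--             if a[1] == i[0]:
--                 i[1].update(a[2])
--     return tags_by_month
-- ===== SOURCE B (Python) =====
-- def get_tags_by_month_for_users(data, usernames):
--     '''One pass over data: no sort, direct month buckets, set-based username lookup.'''
--     users = set(usernames)
--     buckets = [set() for _ in range(12)]
--     for user, month, hashtags in data:
--         if user in users and 1 <= month <= 12:
--             buckets[month - 1].update(hashtags)
--     return [(m, buckets[m - 1]) for m in range(1, 13)]
-- ===== Notes on version B (the rewrite author's own statement) =====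
-- stated objective: faster
-- what changed: Replaced filter + stable sort by month + a 12-bucket inner scan per record with a single unsorted pass that indexes the month bucket directly and checks usernames against a set.
import Mathlib
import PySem

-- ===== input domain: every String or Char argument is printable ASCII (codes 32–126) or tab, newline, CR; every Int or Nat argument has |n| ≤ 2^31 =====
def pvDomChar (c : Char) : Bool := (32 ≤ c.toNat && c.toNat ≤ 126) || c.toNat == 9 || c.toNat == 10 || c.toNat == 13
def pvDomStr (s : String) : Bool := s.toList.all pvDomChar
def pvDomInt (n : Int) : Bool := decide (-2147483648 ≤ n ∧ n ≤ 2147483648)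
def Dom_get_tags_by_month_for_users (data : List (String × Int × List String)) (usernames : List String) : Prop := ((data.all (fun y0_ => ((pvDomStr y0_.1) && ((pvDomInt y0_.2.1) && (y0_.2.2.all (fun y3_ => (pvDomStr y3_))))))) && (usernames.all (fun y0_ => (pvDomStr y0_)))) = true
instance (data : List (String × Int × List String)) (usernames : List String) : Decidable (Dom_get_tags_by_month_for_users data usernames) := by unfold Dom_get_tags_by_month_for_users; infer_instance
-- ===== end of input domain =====

-- B replaces A's filter + stable sort by month + 12-bucket inner scan per record by a single
-- unsorted pass that indexes the month bucket directly and checks usernames against a set (faster in a timing run).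


-- ===== PORT A =====
def get_tags_by_month_for_users (data : List (String × Int × List String)) (usernames : List String) : List (Int × List String) :=
  let tags_by_month : List (Int × PySem.Set String) :=
    [(1, PySem.Set.empty), (2, PySem.Set.empty), (3, PySem.Set.empty), (4, PySem.Set.empty),
     (5, PySem.Set.empty), (6, PySem.Set.empty), (7, PySem.Set.empty), (8, PySem.Set.empty),
     (9, PySem.Set.empty), (10, PySem.Set.empty), (11, PySem.Set.empty), (12, PySem.Set.empty)]
  let L : List (String × Int × List String) :=
    data.foldl (fun L i => if usernames.contains i.1 then L ++ [i] else L) []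
  let L2 := PySem.List.sorted L (fun i => i.2.1) false
  L2.foldl
    (fun tbm a =>
      tbm.map (fun i => if a.2.1 == i.1 then (i.1, PySem.Set.update i.2 a.2.2) else i))
    tags_by_month

-- ===== PORT B =====
def get_tags_by_month_for_users_alt (data : List (String × Int × List String)) (usernames : List String) : List (Int × List String) :=
  let users : PySem.Set String := PySem.Set.ofList usernames
  let buckets0 : List (PySem.Set String) := List.replicate 12 PySem.Set.empty
  let buckets :=
    data.foldl
      (fun b i =>
        if users.contains i.1 && decide (1 ≤ i.2.1) && decide (i.2.1 ≤ 12) then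
          PySem.List.pySetD b (i.2.1 - 1)
            (PySem.Set.update (PySem.List.pyGetD b (i.2.1 - 1) PySem.Set.empty) i.2.2)
        else b)
      buckets0
  (PySem.List.pyRange 1 13 1).map (fun m => (m, PySem.List.pyGetD buckets (m - 1) PySem.Set.empty))

-- ===== PRECONDITION & SPEC =====
def Spec_get_tags_by_month_for_users (data : List (String × Int × List String)) (usernames : List String) (out : List (Int × List String)) : Prop := out = get_tags_by_month_for_users_alt data usernames
instance (data : List (String × Int × List String)) (usernames : List String) (out : List (Int × List String)) : Decidable (Spec_get_tags_by_month_for_users data usernames out) := by unfold Spec_get_tags_by_month_for_users; infer_instance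

-- ===== CLAIM (what is proved, stated in full; the proofs are below) =====
def Claim_equal_get_tags_by_month_for_users : Prop := ∀ (data : List (String × Int × List String)) (usernames : List String), Dom_get_tags_by_month_for_users data usernames → Spec_get_tags_by_month_for_users data usernames (get_tags_by_month_for_users data usernames)

-- ===== LEMMAS AND PROOFS =====

-- canonical per-month fold: both programs compute this set for each month m = 1..12
def pvF (usernames : List String) (m : Int) (data : List (String × Int × List String))
    (s : PySem.Set String) : PySem.Set String :=
  data.foldl (fun s a => if usernames.contains a.1 && (a.2.1 == m) then PySem.Set.update s a.2.2 else s) s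

def pvCanon (usernames : List String) (data : List (String × Int × List String)) :
    List (Int × List String) :=
  [(1, pvF usernames 1 data PySem.Set.empty), (2, pvF usernames 2 data PySem.Set.empty),
   (3, pvF usernames 3 data PySem.Set.empty), (4, pvF usernames 4 data PySem.Set.empty),
   (5, pvF usernames 5 data PySem.Set.empty), (6, pvF usernames 6 data PySem.Set.empty),
   (7, pvF usernames 7 data PySem.Set.empty), (8, pvF usernames 8 data PySem.Set.empty),
   (9, pvF usernames 9 data PySem.Set.empty), (10, pvF usernames 10 data PySem.Set.empty),
   (11, pvF usernames 11 data PySem.Set.empty), (12, pvF usernames 12 data PySem.Set.empty)]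

-- A's inner 12-bucket update, per bucket
def pvG (m : Int) (L : List (String × Int × List String)) (s : PySem.Set String) : PySem.Set String :=
  L.foldl (fun s a => if a.2.1 == m then PySem.Set.update s a.2.2 else s) s

lemma pvAfold (L : List (String × Int × List String)) (t : List (Int × PySem.Set String)) :
    L.foldl (fun tbm a =>
        tbm.map (fun i => if a.2.1 == i.1 then (i.1, PySem.Set.update i.2 a.2.2) else i)) t
      = t.map (fun p => (p.1, pvG p.1 L p.2)) := by
  induction L generalizing t with
  | nil => simp [pvG]
  | cons a L ih =>
      simp only [List.foldl_cons, ih, List.map_map]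
      apply List.map_congr_left
      intro p _
      simp only [Function.comp]
      by_cases h : a.2.1 = p.1
      · simp [h, pvG]
      · simp [h, pvG]

lemma pvL_filter (data : List (String × Int × List String)) (usernames : List String) :
    data.foldl (fun L i => if usernames.contains i.1 then L ++ [i] else L) []
      = data.filter (fun i => usernames.contains i.1) := by
  simpa using PySem.List.foldl_append_if
    (fun i : String × Int × List String => usernames.contains i.1) id data []

lemma pvInsertBy_pairwise (x : String × Int × List String) (ys : List (String × Int × List String))
    (h : ys.Pairwise (fun a b => a.2.1 ≤ b.2.1)) :
    (PySem.List.insertBy (fun a b => decide (a.2.1 < b.2.1)) x ys).Pairwise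
      (fun a b => a.2.1 ≤ b.2.1) := by
  induction ys with
  | nil => simp [PySem.List.insertBy]
  | cons y ys ih =>
      by_cases hb : x.2.1 < y.2.1
      · have hins : PySem.List.insertBy (fun a b => decide (a.2.1 < b.2.1)) x (y :: ys)
            = x :: y :: ys := by simp [PySem.List.insertBy, hb]
        rw [hins]
        refine List.Pairwise.cons ?_ h
        intro z hz
        rcases List.mem_cons.1 hz with rfl | hz
        · omega
        · have := List.rel_of_pairwise_cons h hz
          omega
      · have hins : PySem.List.insertBy (fun a b => decide (a.2.1 < b.2.1)) x (y :: ys)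
            = y :: PySem.List.insertBy (fun a b => decide (a.2.1 < b.2.1)) x ys := by
          simp [PySem.List.insertBy, hb]
        rw [hins]
        refine List.Pairwise.cons ?_ (ih h.tail)
        intro z hz
        rcases (PySem.List.mem_insertBy _ _ _ _).1 hz with rfl | hz
        · omega
        · exact List.rel_of_pairwise_cons h hz

lemma pvInsertBy_filter (m : Int) (x : String × Int × List String)
    (ys : List (String × Int × List String))
    (h : ys.Pairwise (fun a b => a.2.1 ≤ b.2.1)) :
    (PySem.List.insertBy (fun a b => decide (a.2.1 < b.2.1)) x ys).filter (fun a => a.2.1 == m)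
      = ys.filter (fun a => a.2.1 == m) ++ (if x.2.1 == m then [x] else []) := by
  induction ys with
  | nil => by_cases hx : x.2.1 == m <;> simp [PySem.List.insertBy, List.filter, hx]
  | cons y ys ih =>
      by_cases hb : x.2.1 < y.2.1
      · have hins : PySem.List.insertBy (fun a b => decide (a.2.1 < b.2.1)) x (y :: ys)
            = x :: y :: ys := by simp [PySem.List.insertBy, hb]
        rw [hins]
        by_cases hx : x.2.1 == m
        · have hm : x.2.1 = m := by exact_mod_cast beq_iff_eq.1 hx
          have hnil : (y :: ys).filter (fun a => a.2.1 == m) = [] := by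
            rw [List.filter_eq_nil_iff]
            intro z hz
            have hzk : y.2.1 ≤ z.2.1 := by
              rcases List.mem_cons.1 hz with rfl | hz
              · omega
              · exact List.rel_of_pairwise_cons h hz
            simp only [beq_iff_eq]
            omega
          simp [hx, hnil]
        · simp [List.filter_cons, hx]
      · have hins : PySem.List.insertBy (fun a b => decide (a.2.1 < b.2.1)) x (y :: ys)
            = y :: PySem.List.insertBy (fun a b => decide (a.2.1 < b.2.1)) x ys := by
          simp [PySem.List.insertBy, hb]
        rw [hins]
        rw [List.filter_cons, List.filter_cons, ih h.tail]
        by_cases hy : y.2.1 == m <;> simp [hy]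

lemma pvFoldl_insertBy_filter (m : Int) (xs acc : List (String × Int × List String))
    (h : acc.Pairwise (fun a b => a.2.1 ≤ b.2.1)) :
    (xs.foldl (fun acc x =>
        PySem.List.insertBy (fun a b => decide (a.2.1 < b.2.1)) x acc) acc).filter
        (fun a => a.2.1 == m)
      = acc.filter (fun a => a.2.1 == m) ++ xs.filter (fun a => a.2.1 == m) := by
  induction xs generalizing acc with
  | nil => simp
  | cons x xs ih =>
      rw [List.foldl_cons, ih _ (pvInsertBy_pairwise x acc h), pvInsertBy_filter m x acc h,
        List.filter_cons]
      by_cases hx : x.2.1 == m <;> simp [hx]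

-- stability of the sort: within one month, the sorted order is the original order
lemma pvSorted_filter (m : Int) (xs : List (String × Int × List String)) :
    (PySem.List.sorted xs (fun a => a.2.1) false).filter (fun a => a.2.1 == m)
      = xs.filter (fun a => a.2.1 == m) := by
  rw [PySem.List.sorted_eq_foldl_insertBy]
  simpa using pvFoldl_insertBy_filter m xs [] (by simp)

lemma pvG_eq_F (usernames : List String) (m : Int)
    (data : List (String × Int × List String)) (s : PySem.Set String) :
    pvG m (PySem.List.sorted (data.filter (fun i => usernames.contains i.1))
        (fun i => i.2.1) false) s
      = pvF usernames m data s := by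
  unfold pvG pvF
  rw [← List.foldl_filter (p := fun a : String × Int × List String => a.2.1 == m)
      (f := fun s (a : String × Int × List String) => PySem.Set.update s a.2.2),
    pvSorted_filter, List.filter_filter,
    List.foldl_filter]
  congr 1
  funext s a
  rw [Bool.and_comm]

lemma pvA_char (data : List (String × Int × List String)) (usernames : List String) :
    get_tags_by_month_for_users data usernames = pvCanon usernames data := by
  show (PySem.List.sorted
      (data.foldl (fun L i => if usernames.contains i.1 then L ++ [i] else L) [])
      (fun i => i.2.1) false).foldl
      (fun tbm a =>
        tbm.map (fun i => if a.2.1 == i.1 then (i.1, PySem.Set.update i.2 a.2.2) else i))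
      [(1, PySem.Set.empty), (2, PySem.Set.empty), (3, PySem.Set.empty), (4, PySem.Set.empty),
       (5, PySem.Set.empty), (6, PySem.Set.empty), (7, PySem.Set.empty), (8, PySem.Set.empty),
       (9, PySem.Set.empty), (10, PySem.Set.empty), (11, PySem.Set.empty), (12, PySem.Set.empty)]
      = pvCanon usernames data
  rw [pvL_filter, pvAfold]
  simp only [List.map, pvG_eq_F]
  rfl

-- B side: the bucket fold, bucket by bucket
lemma pvSetD_set (b : List (PySem.Set String)) (i : Int) (v : PySem.Set String)
    (h1 : 0 ≤ i) (h2 : i.toNat < b.length) :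
    PySem.List.pySetD b i v = b.set i.toNat v := by
  have hi : i = ((i.toNat : Nat) : Int) := by omega
  rw [PySem.List.pySetD]
  conv_lhs => rw [hi]
  rw [PySem.List.pySet?_natCast b i.toNat v h2, Option.getD_some]

lemma pvGetD_get (b : List (PySem.Set String)) (i : Int) (d : PySem.Set String) (h1 : 0 ≤ i) :
    PySem.List.pyGetD b i d = b.getD i.toNat d := by
  have hi : i = ((i.toNat : Nat) : Int) := by omega
  conv_lhs => rw [hi]
  rw [PySem.List.pyGetD_natCast]

lemma pvSet_contains (xs : List String) (y : String) :
    (PySem.Set.ofList xs).contains y = xs.contains y := by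
  by_cases h : y ∈ xs <;> simp [PySem.Set.mem_ofList, h]

lemma pvB_get (usernames : List String) (m : Int) (hm1 : 1 ≤ m) (hm2 : m ≤ 12)
    (data : List (String × Int × List String)) (b : List (PySem.Set String))
    (hb : b.length = 12) :
    PySem.List.pyGetD
      (data.foldl
        (fun b i =>
          if (PySem.Set.ofList usernames).contains i.1 && decide (1 ≤ i.2.1) && decide (i.2.1 ≤ 12) then
            PySem.List.pySetD b (i.2.1 - 1)
              (PySem.Set.update (PySem.List.pyGetD b (i.2.1 - 1) PySem.Set.empty) i.2.2)
          else b)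
        b) (m - 1) PySem.Set.empty
      = pvF usernames m data (PySem.List.pyGetD b (m - 1) PySem.Set.empty) := by
  induction data generalizing b with
  | nil => simp [pvF]
  | cons a data ih =>
      rw [List.foldl_cons]
      have hstep : pvF usernames m (a :: data) (PySem.List.pyGetD b (m - 1) PySem.Set.empty)
          = pvF usernames m data
            (if usernames.contains a.1 && (a.2.1 == m) then
              PySem.Set.update (PySem.List.pyGetD b (m - 1) PySem.Set.empty) a.2.2
            else PySem.List.pyGetD b (m - 1) PySem.Set.empty) := rfl
      rw [hstep]
      by_cases hc : ((PySem.Set.ofList usernames).contains a.1 && decide (1 ≤ a.2.1) && decide (a.2.1 ≤ 12)) = true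
      · have hc' := hc
        simp only [Bool.and_eq_true, decide_eq_true_eq] at hc'
        have hu : usernames.contains a.1 = true := by
          rw [← pvSet_contains]; exact hc'.1.1
        have ha1 : (1:Int) ≤ a.2.1 := hc'.1.2
        have ha2 : a.2.1 ≤ 12 := hc'.2
        rw [if_pos hc]
        set v := PySem.Set.update (PySem.List.pyGetD b (a.2.1 - 1) PySem.Set.empty) a.2.2 with hv
        have hset : PySem.List.pySetD b (a.2.1 - 1) v = b.set (a.2.1 - 1).toNat v :=
          pvSetD_set b _ v (by omega) (by omega)
        rw [hset, ih _ (by simp [hb])]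
        congr 1
        have hg1 : PySem.List.pyGetD (b.set (a.2.1 - 1).toNat v) (m - 1) PySem.Set.empty
            = (b.set (a.2.1 - 1).toNat v).getD (m - 1).toNat PySem.Set.empty :=
          pvGetD_get _ _ _ (by omega)
        have hg2 : PySem.List.pyGetD b (m - 1) PySem.Set.empty
            = b.getD (m - 1).toNat PySem.Set.empty :=
          pvGetD_get _ _ _ (by omega)
        rw [hg1]
        by_cases hm : a.2.1 = m
        · have hidx : (a.2.1 - 1).toNat = (m - 1).toNat := by omega
          rw [hidx, List.getD_eq_getElem?_getD, List.getElem?_set_self (by omega),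
            Option.getD_some]
          have hu' : a.1 ∈ usernames := by simpa using hu
          simp [hv, hm, hu']
        · have hne : (a.2.1 - 1).toNat ≠ (m - 1).toNat := by omega
          rw [List.getD_eq_getElem?_getD, List.getElem?_set_ne hne,
            ← List.getD_eq_getElem?_getD, ← hg2]
          simp [hm]
      · rw [if_neg hc, ih b hb]
        have hcond : (usernames.contains a.1 && (a.2.1 == m)) = false := by
          rcases Bool.eq_false_or_eq_true (usernames.contains a.1) with hu | hu
          · have hu' : a.1 ∈ usernames := by simpa using hu
            have hrange : ¬((1:Int) ≤ a.2.1 ∧ a.2.1 ≤ 12) := by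
              intro hr
              exact hc (by simp [PySem.Set.mem_ofList, hu', hr.1, hr.2])
            have hne : a.2.1 ≠ m := by omega
            simp [hne]
          · have hu' : a.1 ∉ usernames := by simpa using hu
            simp [hu']
        rw [hcond]
        simp

lemma pvB_char (data : List (String × Int × List String)) (usernames : List String) :
    get_tags_by_month_for_users_alt data usernames = pvCanon usernames data := by
  show (PySem.List.pyRange 1 13 1).map
      (fun m => (m, PySem.List.pyGetD
        (data.foldl
          (fun b i =>
            if (PySem.Set.ofList usernames).contains i.1 && decide (1 ≤ i.2.1) && decide (i.2.1 ≤ 12) then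
              PySem.List.pySetD b (i.2.1 - 1)
                (PySem.Set.update (PySem.List.pyGetD b (i.2.1 - 1) PySem.Set.empty) i.2.2)
            else b)
          (List.replicate 12 PySem.Set.empty)) (m - 1) PySem.Set.empty))
      = pvCanon usernames data
  have hrange : PySem.List.pyRange 1 13 1 = [1,2,3,4,5,6,7,8,9,10,11,12] := by decide
  have H : ∀ m : Int, 1 ≤ m → m ≤ 12 →
      PySem.List.pyGetD
        (data.foldl
          (fun b i =>
            if (PySem.Set.ofList usernames).contains i.1 && decide (1 ≤ i.2.1) && decide (i.2.1 ≤ 12) then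
              PySem.List.pySetD b (i.2.1 - 1)
                (PySem.Set.update (PySem.List.pyGetD b (i.2.1 - 1) PySem.Set.empty) i.2.2)
            else b)
          (List.replicate 12 PySem.Set.empty)) (m - 1) PySem.Set.empty
      = pvF usernames m data PySem.Set.empty := by
    intro m h1 h2
    rw [pvB_get usernames m h1 h2 data _ (by simp)]
    congr 1
    have hkm : m - 1 = (((m - 1).toNat : Nat) : Int) := by omega
    rw [hkm, PySem.List.pyGetD_natCast, List.getD_eq_getElem?_getD, List.getElem?_replicate]
    split <;> rfl
  rw [hrange]
  simp only [List.map]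
  rw [H 1 (by norm_num) (by norm_num), H 2 (by norm_num) (by norm_num),
    H 3 (by norm_num) (by norm_num), H 4 (by norm_num) (by norm_num),
    H 5 (by norm_num) (by norm_num), H 6 (by norm_num) (by norm_num),
    H 7 (by norm_num) (by norm_num), H 8 (by norm_num) (by norm_num),
    H 9 (by norm_num) (by norm_num), H 10 (by norm_num) (by norm_num),
    H 11 (by norm_num) (by norm_num), H 12 (by norm_num) (by norm_num)]
  rfl

-- ===== VERDICT (by name: the statement is the Claim_ definition above) =====
theorem get_tags_by_month_for_users_spec : Claim_equal_get_tags_by_month_for_users := by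
  intro data usernames _
  unfold Spec_get_tags_by_month_for_users
  rw [pvA_char, pvB_char]
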